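-- pv_equiv track=rewrite | github.com/ElginCahangirov/adventofcode | 2025/day06/part2.py | fill_empty_ops
-- ===== SOURCE A (Python) =====
-- def fill_empty_ops(ops: str) -> list[str]:
--     last_op = ""
--     result = []
--
--     for i, op in enumerate(ops):
--         if op != " ":
--             last_op = op
--
--         result.append(last_op)
--
--     return result
-- ===== SOURCE B (Python) =====
-- def fill_empty_ops(ops: str) -> list[str]:
--     # run-length decomposition: consume each run of spaces at once, emitting the
--     # current operator replicated over the run, then step past the breakpoint
--     result = []
--     n = len(ops)
--     cur = ""
--     i = 0
--     while i < n:
--         j = i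
--         while j < n and ops[j] == " ":
--             j += 1
--         result += [cur] * (j - i)
--         if j < n:
--             cur = ops[j]
--             result.append(cur)
--             j += 1
--         i = j
--     return result
-- ===== Notes on version B (the rewrite author's own statement) =====
-- stated objective: alternative
-- what changed: Replaced A's single element-by-element scan carrying last_op with a run-length recursion: count each run of spaces, emit the current operator replicated over the run, then recurse past the next non-space breakpoint.
import Mathlib
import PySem

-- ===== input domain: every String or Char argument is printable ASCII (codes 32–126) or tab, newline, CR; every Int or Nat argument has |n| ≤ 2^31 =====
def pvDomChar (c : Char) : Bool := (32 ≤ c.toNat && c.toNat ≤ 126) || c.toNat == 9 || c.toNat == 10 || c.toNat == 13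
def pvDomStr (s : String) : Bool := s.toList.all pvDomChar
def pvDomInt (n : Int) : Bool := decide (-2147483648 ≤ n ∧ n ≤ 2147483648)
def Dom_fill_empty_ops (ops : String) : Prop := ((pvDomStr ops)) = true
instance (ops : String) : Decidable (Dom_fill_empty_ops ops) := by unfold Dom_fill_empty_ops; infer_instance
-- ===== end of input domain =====

-- B replaces A's element-by-element scan with a run-length recursion over space runs; objective: alternative (same cost).

-- ===== PORT A =====
-- literal port of A's loop: state (last_op, result); each step updates last_op and appends it
def fill_empty_ops (ops : String) : List String :=
  (ops.toList.foldl
    (fun (st : String × List String) op =>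
      let last_op := if op ≠ ' ' then String.ofList [op] else st.1
      (last_op, st.2 ++ [last_op]))
    ("", [])).2

-- ===== PORT B =====
-- port of Source B's while-loop: consume the leading space run, append cur replicated
-- over it to the accumulator, then step past the breakpoint and continue
def fillLoop (chars : List Char) (cur : String) (acc : List String) : List String :=
  let spaces := (chars.takeWhile (fun c => c = ' ')).length
  let acc' := acc ++ List.replicate spaces cur
  match h : chars.drop spaces with
  | [] => acc'
  | c :: rest => fillLoop rest (String.ofList [c]) (acc' ++ [String.ofList [c]])
termination_by chars.length
decreasing_by
  have hlen : (chars.drop spaces).length = chars.length - spaces := List.length_drop ..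
  rw [h] at hlen
  simp at hlen
  omega

def fill_empty_ops_alt (ops : String) : List String :=
  fillLoop ops.toList "" []

-- ===== PRECONDITION & SPEC =====
def Spec_fill_empty_ops (ops : String) (out : List String) : Prop := out = fill_empty_ops_alt ops
instance (ops : String) (out : List String) : Decidable (Spec_fill_empty_ops ops out) := by unfold Spec_fill_empty_ops; infer_instance

-- ===== CLAIM (what is proved, stated in full; the proofs are below) =====
def Claim_equal_fill_empty_ops : Prop := ∀ (ops : String), Dom_fill_empty_ops ops → Spec_fill_empty_ops ops (fill_empty_ops ops)

-- ===== LEMMAS AND PROOFS =====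

-- common characterisation: the simple one-step forward fill both ports compute
def fillScan : List Char → String → List String
  | [], _ => []
  | c :: t, cur =>
      let cur' := if c ≠ ' ' then String.ofList [c] else cur
      cur' :: fillScan t cur'

theorem foldl_eq_fillScan (l : List Char) (cur : String) (acc : List String) :
    (l.foldl
      (fun (st : String × List String) op =>
        let last_op := if op ≠ ' ' then String.ofList [op] else st.1
        (last_op, st.2 ++ [last_op]))
      (cur, acc)).2 = acc ++ fillScan l cur := by
  induction l generalizing cur acc with
  | nil => simp [fillScan]
  | cons c t ih =>
      simp only [List.foldl_cons, fillScan]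
      rw [ih]
      simp

theorem fillLoop_nil (cur : String) (acc : List String) :
    fillLoop [] cur acc = acc := by
  rw [fillLoop]
  split <;> simp_all

theorem fillLoop_space (t : List Char) (cur : String) (acc : List String) :
    fillLoop (' ' :: t) cur acc = fillLoop t cur (acc ++ [cur]) := by
  rw [fillLoop, fillLoop]
  simp only [List.takeWhile]
  norm_num
  split <;> rename_i h <;> split <;> rename_i h2 <;>
    simp_all [List.replicate_succ]

theorem fillLoop_nonspace (c : Char) (t : List Char) (cur : String) (acc : List String)
    (hc : c ≠ ' ') :
    fillLoop (c :: t) cur acc = fillLoop t (String.ofList [c]) (acc ++ [String.ofList [c]]) := by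
  rw [fillLoop]
  simp only [List.takeWhile, hc, decide_false, List.length_nil,
    List.replicate_zero, List.append_nil]
  split <;> rename_i h <;> simp_all

theorem fillLoop_eq_fillScan (l : List Char) (cur : String) (acc : List String) :
    fillLoop l cur acc = acc ++ fillScan l cur := by
  induction l generalizing cur acc with
  | nil => rw [fillLoop_nil]; simp [fillScan]
  | cons c t ih =>
      by_cases hc : c = ' '
      · subst hc
        rw [fillLoop_space, fillScan, ih]
        simp
      · rw [fillLoop_nonspace c t cur acc hc, fillScan, ih]
        simp [hc]

-- ===== VERDICT (by name: the statement is the Claim_ definition above) =====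
theorem fill_empty_ops_spec : Claim_equal_fill_empty_ops := by
  intro ops _
  unfold Spec_fill_empty_ops fill_empty_ops fill_empty_ops_alt
  rw [foldl_eq_fillScan, fillLoop_eq_fillScan]
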